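-- pv_equiv track=rewrite | github.com/vmsreeram/kakuro-solver | kakuro.py | Revise_Mac
-- ===== SOURCE A (Python) =====
-- def isThisOk(Xi,x,Xj,y,assignment,inpHoris,inpVerts):             # to check if this assignment is ok according to constraints
--    # Xi_nrs = AllNeighbors(Xi,inpHoris,inpVerts)
--    # Xj_nrs = AllNeighbors(Xj,inpHoris,inpVerts)
--    # for xi_nr in Xi_nrs:
--    #    if assignment[xi_nr]!=-1 and assignment[xi_nr]==x:
--    #       return False
--    # for xj_nr in Xj_nrs:
--    #    if assignment[xj_nr]!=-1 and assignment[xj_nr]==y: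
--    #       return False
--    if x==y:
--          return False
--    return True
--
-- def Revise_Mac(Xi,Xj,Di,Dj,assignment,inpHoris,inpVerts):         # revise returns true iff domain is changed. else false
--    revised=False
--    Di_Copy=set()
--    for val in Di:
--       Di_Copy.add(val)
--    for x in Di_Copy:
--       flag=True
--       for y in Dj:
--          if isThisOk(Xi,x,Xj,y,assignment,inpHoris,inpVerts):
--             flag=False
--             break
--       if flag:
--          Di.remove(x)
--          revised=True
--    return revised,Di
-- ===== SOURCE B (Python) =====
-- def Revise_Mac(Xi, Xj, Di, Dj, assignment, inpHoris, inpVerts):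
--     # x loses all support iff every y in Dj equals x; so either Dj is empty
--     # (everything is pruned) or Dj is the singleton {v} (v is pruned, if
--     # present). Mutates the same Di object in place, like A does.
--     if not Dj:
--         revised = bool(Di)
--         if revised:
--             Di.clear()
--         return revised, Di
--     v = next(iter(Dj))
--     if all(y == v for y in Dj) and v in Di:
--         Di.remove(v)
--         return True, Di
--     return False, Di
-- ===== Notes on version B (the rewrite author's own statement) =====
-- stated objective: simpler
-- what changed: Replaces A's set-copy plus nested support scan (for each x in set(Di), scan Dj for a support) by a direct case analysis on Dj: a value is unsupported iff every y in Dj equals it, so either Dj is empty (clear Di) or Dj is the singleton {v} (discard v); no nested loop remains. Pre_ only states the set convention for the set[int] parameters Di and Dj (distinct list elements), which every actual set value satisfies.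
import Mathlib
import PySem

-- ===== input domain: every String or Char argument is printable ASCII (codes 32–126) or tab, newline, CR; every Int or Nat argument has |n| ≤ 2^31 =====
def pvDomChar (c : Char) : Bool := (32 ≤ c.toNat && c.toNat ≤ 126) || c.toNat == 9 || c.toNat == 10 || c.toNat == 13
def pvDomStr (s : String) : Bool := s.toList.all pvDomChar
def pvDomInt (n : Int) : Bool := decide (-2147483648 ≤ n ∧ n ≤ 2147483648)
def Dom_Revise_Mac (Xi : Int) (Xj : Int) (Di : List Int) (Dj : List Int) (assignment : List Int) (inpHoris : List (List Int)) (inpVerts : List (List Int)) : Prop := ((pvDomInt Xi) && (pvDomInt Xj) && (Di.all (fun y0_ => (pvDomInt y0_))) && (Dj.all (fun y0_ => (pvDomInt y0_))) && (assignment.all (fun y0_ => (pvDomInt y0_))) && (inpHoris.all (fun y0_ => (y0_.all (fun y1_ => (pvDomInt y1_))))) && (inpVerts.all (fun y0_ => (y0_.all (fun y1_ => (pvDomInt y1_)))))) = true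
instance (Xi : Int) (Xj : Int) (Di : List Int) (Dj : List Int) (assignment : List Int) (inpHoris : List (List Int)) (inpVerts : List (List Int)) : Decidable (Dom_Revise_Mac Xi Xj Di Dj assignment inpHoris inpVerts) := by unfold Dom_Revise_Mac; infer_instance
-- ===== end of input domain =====

-- B replaces A's nested support scan by a case analysis on Dj (empty / singleton set / otherwise);
-- objective: simpler. Both Pythons mutate Di in place identically; the theorem is about the returned pair.

-- ===== PORT A =====
def isThisOk (Xi : Int) (x : Int) (Xj : Int) (y : Int) (assignment : List Int) (inpHoris : List (List Int)) (inpVerts : List (List Int)) : Bool :=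
  if x = y then false else true

-- the inner 'for y in Dj: … break' loop of A: flag stays True iff no y supports x
def flagLoop (Xi : Int) (x : Int) (Xj : Int) (Dj : List Int) (assignment : List Int) (inpHoris : List (List Int)) (inpVerts : List (List Int)) : Bool :=
  match Dj with
  | [] => true
  | y :: ys =>
      if isThisOk Xi x Xj y assignment inpHoris inpVerts then false
      else flagLoop Xi x Xj ys assignment inpHoris inpVerts

-- one iteration of A's outer loop over Di_Copy (state = (revised, Di)).
-- remove? never returns none here (x was copied from Di and is removed at most once), so getD is the total form.
def reviseStep (Xi : Int) (Xj : Int) (Dj : List Int) (assignment : List Int) (inpHoris : List (List Int)) (inpVerts : List (List Int)) (st : Bool × List Int) (x : Int) : Bool × List Int :=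
  if flagLoop Xi x Xj Dj assignment inpHoris inpVerts then
    (true, (PySem.List.remove? st.2 x).getD st.2)
  else st

def Revise_Mac (Xi : Int) (Xj : Int) (Di : List Int) (Dj : List Int) (assignment : List Int) (inpHoris : List (List Int)) (inpVerts : List (List Int)) : Bool × List Int :=
  (PySem.Set.ofList Di).foldl (reviseStep Xi Xj Dj assignment inpHoris inpVerts) (false, Di)

-- ===== PORT B =====
def Revise_Mac_alt (Xi : Int) (Xj : Int) (Di : List Int) (Dj : List Int) (assignment : List Int) (inpHoris : List (List Int)) (inpVerts : List (List Int)) : Bool × List Int :=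
  match Dj with
  | [] =>
      let revised := !Di.isEmpty
      (revised, if revised then ([] : List Int) else Di)
  | v :: _ =>  -- v = next(iter(Dj)); only consumed under the all-equal test, so any choice gives the same result
      if Dj.all (fun y => y == v) && Di.contains v then
        (true, (PySem.List.remove? Di v).getD Di)
      else (false, Di)

-- ===== PRECONDITION & SPEC =====
-- Di and Dj are Python set[int] values; Pre_ states the set convention (distinct elements).
-- It excludes duplicate-carrying lists, which are not values of the parameter type set[int]:
-- there A's per-distinct-value list.remove leaves the duplicates behind while B clears.
def Pre_Revise_Mac (Xi : Int) (Xj : Int) (Di : List Int) (Dj : List Int) (assignment : List Int) (inpHoris : List (List Int)) (inpVerts : List (List Int)) : Prop :=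
  Di.Nodup ∧ Dj.Nodup
instance (Xi : Int) (Xj : Int) (Di : List Int) (Dj : List Int) (assignment : List Int) (inpHoris : List (List Int)) (inpVerts : List (List Int)) : Decidable (Pre_Revise_Mac Xi Xj Di Dj assignment inpHoris inpVerts) := by unfold Pre_Revise_Mac; infer_instance

def pvWitness_Revise_Mac : Int × Int × List Int × List Int × List Int × List (List Int) × List (List Int) :=
  (0, 1, [1, 2, 3], [2], [], [], [])

def Spec_Revise_Mac (Xi : Int) (Xj : Int) (Di : List Int) (Dj : List Int) (assignment : List Int) (inpHoris : List (List Int)) (inpVerts : List (List Int)) (out : Bool × List Int) : Prop := out = Revise_Mac_alt Xi Xj Di Dj assignment inpHoris inpVerts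
instance (Xi : Int) (Xj : Int) (Di : List Int) (Dj : List Int) (assignment : List Int) (inpHoris : List (List Int)) (inpVerts : List (List Int)) (out : Bool × List Int) : Decidable (Spec_Revise_Mac Xi Xj Di Dj assignment inpHoris inpVerts out) := by unfold Spec_Revise_Mac; infer_instance

-- ===== CLAIM (what is proved, stated in full; the proofs are below) =====
def Claim_equal_Revise_Mac : Prop := ∀ (Xi : Int) (Xj : Int) (Di : List Int) (Dj : List Int) (assignment : List Int) (inpHoris : List (List Int)) (inpVerts : List (List Int)), Dom_Revise_Mac Xi Xj Di Dj assignment inpHoris inpVerts → Pre_Revise_Mac Xi Xj Di Dj assignment inpHoris inpVerts → Spec_Revise_Mac Xi Xj Di Dj assignment inpHoris inpVerts (Revise_Mac Xi Xj Di Dj assignment inpHoris inpVerts)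

-- ===== LEMMAS AND PROOFS =====

-- `rmF l x` = total form of Python's Di.remove(x)
def rmF (l : List Int) (x : Int) : List Int := (PySem.List.remove? l x).getD l

-- first occurrences of the values of Di not in seen, in order (= what Di_Copy contributes)
def newVals (seen : PySem.Set Int) (Di : List Int) : List Int :=
  match Di with
  | [] => []
  | v :: rest =>
      if PySem.Set.contains seen v then newVals seen rest
      else v :: newVals (PySem.Set.add seen v) rest

-- what is left of Di after removing one occurrence of each of its distinct values not in seen
def dedupTail (seen : PySem.Set Int) (Di : List Int) : List Int :=
  match Di with
  | [] => []
  | v :: rest =>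
      if PySem.Set.contains seen v then v :: dedupTail (PySem.Set.add seen v) rest
      else dedupTail (PySem.Set.add seen v) rest

theorem flagLoop_eq (Xi x Xj : Int) (Dj assignment : List Int) (inpHoris inpVerts : List (List Int)) :
    flagLoop Xi x Xj Dj assignment inpHoris inpVerts = Dj.all (fun y => y == x) := by
  induction Dj with
  | nil => rfl
  | cons y ys ih =>
      simp only [flagLoop, isThisOk, List.all_cons, ih]
      by_cases h : x = y
      · simp [h]
      · have h' : y ≠ x := fun hh => h hh.symm
        simp [h, h']

theorem rm_cons_ne (v x : Int) (l : List Int) (h : x ≠ v) : rmF (v :: l) x = v :: rmF l x := by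
  have h' : v ≠ x := fun hh => h hh.symm
  simp only [rmF, PySem.List.remove?_cons_of_ne l h']
  cases PySem.List.remove? l x <;> rfl

theorem foldl_rm_cons (S : List Int) (v : Int) (l : List Int) (h : ∀ x ∈ S, x ≠ v) :
    S.foldl rmF (v :: l) = v :: S.foldl rmF l := by
  induction S generalizing l with
  | nil => rfl
  | cons x S' ih =>
      simp only [List.foldl_cons, rm_cons_ne v x l (h x List.mem_cons_self)]
      exact ih _ (fun y hy => h y (List.mem_cons_of_mem _ hy))

theorem not_mem_seen_of_mem_newVals (Di : List Int) (seen : PySem.Set Int) (x : Int)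
    (h : x ∈ newVals seen Di) : x ∉ seen := by
  induction Di generalizing seen with
  | nil => simp [newVals] at h
  | cons v rest ih =>
      by_cases hm : v ∈ seen
      · rw [newVals, if_pos (by simpa using hm)] at h
        exact ih seen h
      · rw [newVals, if_neg (by simpa using hm)] at h
        rcases List.mem_cons.mp h with rfl | h'
        · exact hm
        · intro hx
          exact ih _ h' ((PySem.Set.mem_add _ _ _).mpr (Or.inl hx))

theorem foldl_rm_newVals (Di : List Int) (seen : PySem.Set Int) :
    (newVals seen Di).foldl rmF Di = dedupTail seen Di := by
  induction Di generalizing seen with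
  | nil => rfl
  | cons v rest ih =>
      by_cases hm : v ∈ seen
      · rw [newVals, if_pos (by simpa using hm), dedupTail, if_pos (by simpa using hm)]
        rw [foldl_rm_cons _ v rest
            (fun x hx hxv => not_mem_seen_of_mem_newVals rest seen x hx (hxv ▸ hm)), ih]
        rw [PySem.Set.add_of_mem hm]
      · rw [newVals, if_neg (by simpa using hm), dedupTail, if_neg (by simpa using hm)]
        rw [List.foldl_cons]
        have : rmF (v :: rest) v = rest := by simp [rmF]
        rw [this, ih]

theorem ofList_go (Di : List Int) (seen : PySem.Set Int) :
    Di.foldl PySem.Set.add seen = seen ++ newVals seen Di := by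
  induction Di generalizing seen with
  | nil => simp [newVals]
  | cons v rest ih =>
      by_cases hm : v ∈ seen
      · rw [List.foldl_cons, PySem.Set.add_of_mem hm, newVals, if_pos (by simpa using hm)]
        exact ih seen
      · rw [List.foldl_cons, PySem.Set.add_of_not_mem hm, newVals, if_neg (by simpa using hm)]
        rw [ih (seen ++ [v])]
        have : PySem.Set.add seen v = seen ++ [v] := PySem.Set.add_of_not_mem hm
        rw [this, List.append_assoc]
        rfl

theorem ofList_eq_newVals (Di : List Int) : PySem.Set.ofList Di = newVals PySem.Set.empty Di := by
  have h := ofList_go Di PySem.Set.empty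
  rw [PySem.Set.ofList_eq_foldl]
  simpa [PySem.Set.empty] using h

-- a duplicate-free Di disjoint from seen has nothing left after the pruning pass
theorem dedupTail_eq_nil (Di : List Int) (seen : PySem.Set Int)
    (hnd : Di.Nodup) (hdis : ∀ x ∈ Di, x ∉ seen) : dedupTail seen Di = [] := by
  induction Di generalizing seen with
  | nil => rfl
  | cons v rest ih =>
      have hn := List.nodup_cons.mp hnd
      rw [dedupTail, if_neg (by simpa using hdis v List.mem_cons_self)]
      exact ih _ hn.2 (fun x hx => by
        intro hmem
        rcases (PySem.Set.mem_add _ _ _).mp hmem with h1 | rfl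
        · exact hdis x (List.mem_cons_of_mem _ hx) h1
        · exact hn.1 hx)

-- A's outer fold when every flag is True (Dj = [])
theorem foldl_step_empty (Xi Xj : Int) (assignment : List Int) (inpHoris inpVerts : List (List Int))
    (S : List Int) (r : Bool) (l : List Int) :
    S.foldl (reviseStep Xi Xj [] assignment inpHoris inpVerts) (r, l)
      = ((r || !S.isEmpty), S.foldl rmF l) := by
  induction S generalizing r l with
  | nil => simp
  | cons x S' ih =>
      simp only [List.foldl_cons, reviseStep, flagLoop, if_true, ih, rmF]
      simp

-- A's outer fold when no element of S triggers
theorem foldl_step_none (Xi Xj : Int) (Dj assignment : List Int) (inpHoris inpVerts : List (List Int))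
    (S : List Int) (st : Bool × List Int)
    (h : ∀ x ∈ S, flagLoop Xi x Xj Dj assignment inpHoris inpVerts = false) :
    S.foldl (reviseStep Xi Xj Dj assignment inpHoris inpVerts) st = st := by
  induction S with
  | nil => rfl
  | cons x S' ih =>
      simp only [List.foldl_cons, reviseStep, h x List.mem_cons_self]
      simp only [Bool.false_eq_true, if_false]
      exact ih (fun y hy => h y (List.mem_cons_of_mem _ hy))

-- A's outer fold for nonempty Dj = w :: ws: at most one value triggers, namely w
theorem foldl_step_single (Xi Xj w : Int) (ws assignment : List Int) (inpHoris inpVerts : List (List Int))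
    (S : List Int) (hS : S.Nodup) (l : List Int) :
    S.foldl (reviseStep Xi Xj (w :: ws) assignment inpHoris inpVerts) (false, l)
      = if w ∈ S ∧ (w :: ws).all (fun y => y == w) then (true, rmF l w) else (false, l) := by
  induction S generalizing l with
  | nil => simp
  | cons x S' ih =>
      have hnodup := List.nodup_cons.mp hS
      by_cases hcx : flagLoop Xi x Xj (w :: ws) assignment inpHoris inpVerts = true
      · have hall' : ((w :: ws).all (fun y => y == x)) = true := by
          rw [flagLoop_eq] at hcx; exact hcx
        have hxw : x = w := by
          have h1 := List.all_eq_true.mp hall' w List.mem_cons_self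
          exact (beq_iff_eq.mp h1).symm
        subst hxw
        simp only [List.foldl_cons, reviseStep, hcx, if_true]
        rw [foldl_step_none _ _ _ _ _ _ S' _ (fun y hy => by
          rw [flagLoop_eq]
          by_contra hne
          have h2 := List.all_eq_true.mp (eq_true_of_ne_false hne) x List.mem_cons_self
          exact hnodup.1 ((beq_iff_eq.mp h2).symm ▸ hy))]
        simp [hall', rmF]
      · have hcx' : flagLoop Xi x Xj (w :: ws) assignment inpHoris inpVerts = false :=
          Bool.eq_false_iff.mpr (fun h => hcx h)
        simp only [List.foldl_cons, reviseStep, hcx', Bool.false_eq_true, if_false]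
        rw [ih hnodup.2 l]
        by_cases hall : ((w :: ws).all (fun y => y == w)) = true
        · have hxw : x ≠ w := fun h => by
            subst h
            rw [flagLoop_eq] at hcx
            exact hcx hall
          have hwx : w ≠ x := fun h => hxw h.symm
          simp [hall, List.mem_cons, hwx]
        · simp [hall]

theorem Revise_Mac_eq_alt (Xi Xj : Int) (Di Dj assignment : List Int) (inpHoris inpVerts : List (List Int))
    (hDi : Di.Nodup) :
    Revise_Mac Xi Xj Di Dj assignment inpHoris inpVerts
      = Revise_Mac_alt Xi Xj Di Dj assignment inpHoris inpVerts := by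
  cases Dj with
  | nil =>
      unfold Revise_Mac Revise_Mac_alt
      rw [foldl_step_empty, ofList_eq_newVals, foldl_rm_newVals,
          dedupTail_eq_nil Di PySem.Set.empty hDi (by simp [PySem.Set.empty])]
      cases Di <;> simp [newVals]
  | cons w ws =>
      unfold Revise_Mac Revise_Mac_alt
      rw [foldl_step_single Xi Xj w ws assignment inpHoris inpVerts _ (PySem.Set.nodup_ofList Di) Di]
      by_cases hall : ((w :: ws).all (fun y => y == w)) = true
      · by_cases hmem : w ∈ Di
        · have hS : w ∈ PySem.Set.ofList Di := (PySem.Set.mem_ofList Di w).mpr hmem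
          simp [hS, hall, hmem, rmF]
        · have hS : w ∉ PySem.Set.ofList Di := fun h => hmem ((PySem.Set.mem_ofList Di w).mp h)
          simp [hS, hall, hmem]
      · simp [hall]

-- ===== VERDICT (by name: the statement is the Claim_ definition above) =====
theorem Revise_Mac_spec : Claim_equal_Revise_Mac := by
  intro Xi Xj Di Dj assignment inpHoris inpVerts _ hpre
  exact Revise_Mac_eq_alt Xi Xj Di Dj assignment inpHoris inpVerts hpre.1
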